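-- pv_equiv track=rewrite | github.com/BraxTos/EmbeddedSystems | CNVRT/convertor.py | merge_forward_commands
-- ===== SOURCE A (Python) =====
-- def merge_forward_commands(commands):
--     merged = []
--     acc = 0
--
--     for cmd in commands:
--         if cmd.startswith("F "):
--             acc += int(cmd.split()[1])
--         else:
--             if acc > 0:
--                 merged.append(f"F {acc}")
--                 acc = 0
--             merged.append(cmd)
--
--     if acc > 0:
--         merged.append(f"F {acc}")
--
--     return merged
-- ===== SOURCE B (Python) =====
-- def merge_forward_commands(commands):
--     merged = []
--     i, n = 0, len(commands)
--     while i < n: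
--         cmd = commands[i]
--         if cmd.startswith("F "):
--             total = 0
--             while i < n and commands[i].startswith("F "):
--                 total += int(commands[i].split()[1])
--                 i += 1
--             if total > 0:
--                 merged.append(f"F {total}")
--         else:
--             merged.append(cmd)
--             i += 1
--     return merged
-- ===== Notes on version B (the rewrite author's own statement) =====
-- stated objective: alternative
-- what changed: B segments the command stream into maximal runs of 'F ' commands and emits one 'F <sum>' per positive-total run, instead of A's per-element loop threading a single accumulator (which A only resets when positive, leaking negative totals across runs).
-- intended difference: On inputs where some maximal F-run has a negative total and a later F-run has a positive total, A leaks the leftover negative accumulator into the later runs and under-reports or drops their merged F command, while B treats each run independently, which is the intended per-run merge; the leak is an artefact of A resetting its accumulator only when it is positive. — e.g. on merge_forward_commands(["F -1", "X", "F 1"]): A returns ["X"], B returns ["X", "F 1"]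
import Mathlib
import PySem

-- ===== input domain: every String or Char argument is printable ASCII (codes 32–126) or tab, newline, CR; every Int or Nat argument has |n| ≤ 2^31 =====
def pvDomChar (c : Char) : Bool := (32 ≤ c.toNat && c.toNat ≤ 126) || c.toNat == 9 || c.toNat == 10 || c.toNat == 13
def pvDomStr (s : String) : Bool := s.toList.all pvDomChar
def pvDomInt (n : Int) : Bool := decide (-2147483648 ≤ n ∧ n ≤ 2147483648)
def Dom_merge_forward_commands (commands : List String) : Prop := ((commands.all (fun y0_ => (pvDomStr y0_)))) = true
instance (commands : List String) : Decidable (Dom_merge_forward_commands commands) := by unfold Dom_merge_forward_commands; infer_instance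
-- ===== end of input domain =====

-- B merges runs of "F " commands group-by-group (one pass over maximal runs) instead of A's
-- element loop with a leaky accumulator; same cost ("alternative"); B differs from A exactly on
-- the D_ inputs stated below (negative-total run before a positive-total run).

-- shared small helpers: is the command an "F " command, and its parsed integer argument
def pvIsF (c : String) : Bool := PySem.Str.startswith c "F "
-- int(cmd.split()[1]) as an Option (none exactly where Python raises; Pre_ excludes that)
def pvFTok? (c : String) : Option Int := (PySem.List.pyGet? (PySem.Str.split₀ c) 1).bind PySem.Int.ofStr?
def pvFVal (c : String) : Int := (pvFTok? c).getD 0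

-- ===== PORT A =====
-- A's for-loop as structural recursion over the commands carrying (merged, acc)
def pvGoA : List String → List String → Int → List String
  | [], merged, acc => if acc > 0 then merged ++ ["F " ++ PySem.Int.toStr acc] else merged
  | cmd :: rest, merged, acc =>
    if pvIsF cmd then
      pvGoA rest merged (acc + pvFVal cmd)
    else
      if acc > 0 then pvGoA rest ((merged ++ ["F " ++ PySem.Int.toStr acc]) ++ [cmd]) 0
      else pvGoA rest (merged ++ [cmd]) acc

def merge_forward_commands (commands : List String) : List String := pvGoA commands [] 0

-- ===== PORT B =====
-- B's outer while-loop: consume a maximal run of "F " commands at once, sum it, emit per run.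
-- The Nat argument is fuel, a totality guard only: the wrapper passes length+1, which is never
-- exhausted (each step consumes at least one command).
def pvAltGo : Nat → List String → List String
  | _, [] => []
  | 0, _ :: _ => []
  | fuel + 1, cmd :: rest =>
    if pvIsF cmd then
      let run := cmd :: rest.takeWhile pvIsF
      let total := (run.map pvFVal).sum
      let tail := pvAltGo fuel (rest.dropWhile pvIsF)
      if total > 0 then ("F " ++ PySem.Int.toStr total) :: tail else tail
    else cmd :: pvAltGo fuel rest

def merge_forward_commands_alt (commands : List String) : List String :=
  pvAltGo (commands.length + 1) commands

-- ===== PRECONDITION & SPEC =====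
-- Pre_ excludes exactly the inputs where Python A raises: an "F "-command whose second
-- whitespace token is missing (IndexError) or not int-parseable (ValueError).
def Pre_merge_forward_commands (commands : List String) : Prop :=
  ∀ cmd ∈ commands, pvIsF cmd = true → (pvFTok? cmd).isSome = true
instance (commands : List String) : Decidable (Pre_merge_forward_commands commands) := by
  unfold Pre_merge_forward_commands; infer_instance

def pvWitness_merge_forward_commands : List String := ["F 2", "X", "F 3"]

-- On inputs where some maximal F-run has negative total and a later F-run has positive total,
-- A leaks the leftover negative accumulator into later runs (it only resets acc when positive),
-- while B merges each run independently — the intended behaviour.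
def D_merge_forward_commands (commands : List String) : Prop :=
  ((((commands.splitOnP (fun c => !pvIsF c)).map (fun s => (s.map pvFVal).sum)).dropWhile
      (fun t => decide (0 ≤ t))).tail.any (fun t => decide (0 < t))) = true
instance (commands : List String) : Decidable (D_merge_forward_commands commands) := by
  unfold D_merge_forward_commands; infer_instance

def Spec_merge_forward_commands (commands : List String) (out : List String) : Prop :=
  ¬ D_merge_forward_commands commands → out = merge_forward_commands_alt commands
instance (commands : List String) (out : List String) : Decidable (Spec_merge_forward_commands commands out) := by
  unfold Spec_merge_forward_commands; infer_instance

def pvDiffWitness_merge_forward_commands : List String := ["F -1", "X", "F 1"]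
def pvDiffWitnessOut_merge_forward_commands : (List String) × (List String) :=
  (["X"], ["X", "F 1"])

-- ===== CLAIM =====
def Claim_unchanged_merge_forward_commands : Prop := ∀ (commands : List String), Dom_merge_forward_commands commands → Pre_merge_forward_commands commands → Spec_merge_forward_commands commands (merge_forward_commands commands)
def Claim_changed_merge_forward_commands : Prop := Dom_merge_forward_commands (pvDiffWitness_merge_forward_commands) ∧ Pre_merge_forward_commands (pvDiffWitness_merge_forward_commands) ∧ D_merge_forward_commands (pvDiffWitness_merge_forward_commands) ∧ merge_forward_commands (pvDiffWitness_merge_forward_commands) = pvDiffWitnessOut_merge_forward_commands.1 ∧ merge_forward_commands_alt (pvDiffWitness_merge_forward_commands) = pvDiffWitnessOut_merge_forward_commands.2 ∧ pvDiffWitnessOut_merge_forward_commands.1 ≠ pvDiffWitnessOut_merge_forward_commands.2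

def Claim_exact_merge_forward_commands : Prop := ∀ (commands : List String), Dom_merge_forward_commands commands → Pre_merge_forward_commands commands → D_merge_forward_commands commands → merge_forward_commands commands ≠ merge_forward_commands_alt commands

-- ===== LEMMAS AND PROOFS =====

-- proofs-only abbreviations for the two views of the run totals
def pvSplitTotals (l : List String) : List Int :=
  (l.splitOnP (fun c => !pvIsF c)).map (fun s => (s.map pvFVal).sum)

def pvHasNegBeforePos : List Int → Bool
  | [] => false
  | t :: ts => (decide (t < 0) && ts.any (fun u => decide (0 < u))) || pvHasNegBeforePos ts

theorem pvHasPos_of_HNBP (ts : List Int) (h : pvHasNegBeforePos ts = true) :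
    ts.any (fun u => decide (0 < u)) = true := by
  induction ts with
  | nil => simp [pvHasNegBeforePos] at h
  | cons t ts ih =>
    simp only [pvHasNegBeforePos, Bool.or_eq_true, Bool.and_eq_true] at h
    rcases h with ⟨_, hp⟩ | h
    · simp only [List.any_cons, Bool.or_eq_true]; exact Or.inr hp
    · simp only [List.any_cons, Bool.or_eq_true]; exact Or.inr (ih h)

-- the Bool in D_ is exactly "some negative entry occurs before some positive entry"
theorem pvNegB_eq (ts : List Int) :
    ((ts.dropWhile (fun t => decide (0 ≤ t))).tail.any (fun t => decide (0 < t)))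
      = pvHasNegBeforePos ts := by
  induction ts with
  | nil => rfl
  | cons t ts ih =>
    by_cases h : (0 : Int) ≤ t
    · rw [List.dropWhile_cons_of_pos (by simpa using h), ih]
      simp [pvHasNegBeforePos, show ¬t < 0 by omega]
    · rw [List.dropWhile_cons_of_neg (by simpa using h)]
      simp only [List.tail_cons, pvHasNegBeforePos, show t < 0 by omega, decide_true,
        Bool.true_and]
      cases hp : ts.any (fun u => decide (0 < u)) with
      | true => simp
      | false =>
        have : pvHasNegBeforePos ts = false := by
          cases hh : pvHasNegBeforePos ts with
          | false => rfl
          | true => rw [pvHasPos_of_HNBP ts hh] at hp; exact hp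
        simp [this]

theorem pvAnyPos_filter (ts : List Int) :
    ((ts.filter (fun t => decide (t ≠ 0))).any (fun u => decide (0 < u)))
      = ts.any (fun u => decide (0 < u)) := by
  induction ts with
  | nil => rfl
  | cons t ts ih =>
    by_cases h : t = 0
    · subst h
      rw [show List.filter (fun t => decide (t ≠ 0)) ((0 : Int) :: ts)
          = List.filter (fun t => decide (t ≠ 0)) ts from by simp, ih, List.any_cons]
      simp
    · rw [show List.filter (fun t' => decide (t' ≠ 0)) (t :: ts)
          = t :: List.filter (fun t' => decide (t' ≠ 0)) ts from by simp [h],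
        List.any_cons, List.any_cons, ih]

-- zero entries are irrelevant to "negative before positive"
theorem pvHNBP_filter (ts : List Int) :
    pvHasNegBeforePos (ts.filter (fun t => decide (t ≠ 0))) = pvHasNegBeforePos ts := by
  induction ts with
  | nil => rfl
  | cons t ts ih =>
    by_cases h : t = 0
    · subst h
      rw [show List.filter (fun t => decide (t ≠ 0)) ((0 : Int) :: ts)
          = List.filter (fun t => decide (t ≠ 0)) ts from by simp, ih]
      simp [pvHasNegBeforePos]
    · rw [show List.filter (fun t' => decide (t' ≠ 0)) (t :: ts)
          = t :: List.filter (fun t' => decide (t' ≠ 0)) ts from by simp [h]]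
      simp only [pvHasNegBeforePos]
      rw [pvAnyPos_filter, ih]

-- A's merged-list parameter factors out as a prefix
theorem pvGoA_merged (l : List String) (merged : List String) (acc : Int) :
    pvGoA l merged acc = merged ++ pvGoA l [] acc := by
  induction l generalizing merged acc with
  | nil => simp only [pvGoA]; split <;> simp
  | cons c rest ih =>
    simp only [pvGoA]
    split
    · rw [ih]
    · split
      · rw [ih (merged ++ ["F " ++ PySem.Int.toStr acc] ++ [c]) 0,
            ih (([] : List String) ++ ["F " ++ PySem.Int.toStr acc] ++ [c]) 0]
        simp
      · rw [ih (merged ++ [c]) acc, ih (([] : List String) ++ [c]) acc]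
        simp

-- consuming a whole run of "F " commands just adds its total to the accumulator
theorem pvGoA_run (run rest : List String) (acc : Int)
    (h : ∀ c ∈ run, pvIsF c = true) :
    pvGoA (run ++ rest) [] acc = pvGoA rest [] (acc + (run.map pvFVal).sum) := by
  induction run generalizing acc with
  | nil => simp
  | cons c run ih =>
    have hc : pvIsF c = true := h c (by simp)
    simp only [List.cons_append, pvGoA, hc, if_pos]
    rw [ih _ (fun d hd => h d (by simp [hd]))]
    simp [add_assoc]

-- a positive accumulator is flushed first when the rest is empty or starts with a non-F command
theorem pvGoA_flush (rest : List String) (t : Int) (ht : 0 < t)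
    (h : rest = [] ∨ ∃ d r, rest = d :: r ∧ pvIsF d = false) :
    pvGoA rest [] t = ("F " ++ PySem.Int.toStr t) :: pvGoA rest [] 0 := by
  rcases h with rfl | ⟨d, r, rfl, hd⟩
  · simp [pvGoA, ht]
  · simp only [pvGoA, hd, Bool.false_eq_true, if_pos ht, lt_irrefl, reduceIte]
    rw [pvGoA_merged r (([] : List String) ++ ["F " ++ PySem.Int.toStr t] ++ [d]) 0,
        pvGoA_merged r (([] : List String) ++ [d]) 0]
    simp

-- shape of dropWhile: empty or headed by a failing element
theorem pvDropWhile_shape (l : List String) :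
    l.dropWhile pvIsF = [] ∨ ∃ d r, l.dropWhile pvIsF = d :: r ∧ pvIsF d = false := by
  rcases h : l.dropWhile pvIsF with _ | ⟨d, r⟩
  · exact Or.inl rfl
  · refine Or.inr ⟨d, r, rfl, ?_⟩
    have := List.head_dropWhile_not pvIsF (l := l) (by simp [h])
    simp [h] at this
    simpa using this

-- every element of the leading run is an "F " command
theorem pvRun_all (c : String) (rest : List String) (hc : pvIsF c = true) :
    ∀ d ∈ (c :: rest.takeWhile pvIsF), pvIsF d = true := by
  intro d hd
  rcases List.mem_cons.mp hd with rfl | hd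
  · exact hc
  · exact List.mem_takeWhile_imp hd


-- proofs-only view of the run totals, in the same run-by-run shape as the induction
def pvRunTotalsGo : Nat → List String → List Int
  | _, [] => []
  | 0, _ :: _ => []
  | fuel + 1, cmd :: rest =>
    if pvIsF cmd then
      ((cmd :: rest.takeWhile pvIsF).map pvFVal).sum :: pvRunTotalsGo fuel (rest.dropWhile pvIsF)
    else pvRunTotalsGo fuel rest

-- splitting off an all-F run prepends it to the first segment
theorem pvSplitOnP_run (run x : List String) (h : ∀ c ∈ run, pvIsF c = true) :
    (run ++ x).splitOnP (fun c => !pvIsF c)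
      = (x.splitOnP (fun c => !pvIsF c)).modifyHead (run ++ ·) := by
  induction run with
  | nil =>
    rw [List.nil_append]
    rcases hx : x.splitOnP (fun c => !pvIsF c) with _ | ⟨a, l⟩ <;> rfl
  | cons c run ih =>
    have hc : pvIsF c = true := h c (by simp)
    rw [List.cons_append, List.splitOnP_cons]
    simp only [hc, Bool.not_true, Bool.false_eq_true, reduceIte]
    rw [ih (fun e he => h e (List.mem_cons_of_mem _ he))]
    rw [List.modifyHead_modifyHead]
    rfl

-- up to zero entries, the splitOnP totals are the run-by-run totals
theorem pvFilterSplit_eq (fuel : Nat) (l : List String) (hl : l.length < fuel) :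
    (pvSplitTotals l).filter (fun t => decide (t ≠ 0))
      = (pvRunTotalsGo fuel l).filter (fun t => decide (t ≠ 0)) := by
  induction fuel generalizing l with
  | zero => exact absurd hl (Nat.not_lt_zero _)
  | succ f ih =>
    match l, hl with
    | [], _ => rfl
    | c :: rest, hl =>
      have hlen : (rest.dropWhile pvIsF).length < f := by
        have := List.length_dropWhile_le pvIsF rest
        simp at hl; omega
      by_cases hc : pvIsF c = true
      · have hgo : pvRunTotalsGo (f + 1) (c :: rest)
            = ((c :: rest.takeWhile pvIsF).map pvFVal).sum
              :: pvRunTotalsGo f (rest.dropWhile pvIsF) := by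
          simp [pvRunTotalsGo, hc]
        have hsp : pvSplitTotals (c :: rest)
            = ((pvRunTotalsGo (f + 1) (c :: rest)).headD 0)
              :: (pvSplitTotals (rest.dropWhile pvIsF)).tail := by
          unfold pvSplitTotals
          conv_lhs => rw [show c :: rest = (c :: rest.takeWhile pvIsF) ++ rest.dropWhile pvIsF by
            simp [List.takeWhile_append_dropWhile]]
          rw [pvSplitOnP_run _ _ (pvRun_all c rest hc), hgo]
          rcases pvDropWhile_shape rest with hnil | ⟨d, r, hdr, hd⟩
          · rw [hnil]; simp
          · rw [hdr, List.splitOnP_cons]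
            simp [hd]
        have htailsp : pvSplitTotals (rest.dropWhile pvIsF)
            = 0 :: (pvSplitTotals (rest.dropWhile pvIsF)).tail
            ∨ pvSplitTotals (rest.dropWhile pvIsF) = [0] := by
          rcases pvDropWhile_shape rest with hnil | ⟨d, r, hdr, hd⟩
          · right; rw [hnil]; rfl
          · left
            rw [hdr]
            unfold pvSplitTotals
            rw [List.splitOnP_cons]
            simp [hd]
        have hrec : (pvSplitTotals (rest.dropWhile pvIsF)).tail.filter (fun t => decide (t ≠ 0))
            = (pvRunTotalsGo f (rest.dropWhile pvIsF)).filter (fun t => decide (t ≠ 0)) := by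
          rw [← ih (rest.dropWhile pvIsF) hlen]
          rcases htailsp with he | he
          · conv_rhs => rw [he]
            rw [List.filter_cons]
            simp
          · rw [he]
            simp
        rw [hsp, hgo]
        simp only [List.headD_cons, List.filter_cons]
        rw [hrec]
      · have hgo : pvRunTotalsGo (f + 1) (c :: rest) = pvRunTotalsGo f rest := by
          simp [pvRunTotalsGo, hc]
        have hsp : pvSplitTotals (c :: rest) = 0 :: pvSplitTotals rest := by
          unfold pvSplitTotals
          rw [List.splitOnP_cons]
          simp [hc]
        rw [hsp, hgo, List.filter_cons]
        simp only [show ¬((0 : Int) ≠ 0) by simp, decide_false, Bool.false_eq_true, reduceIte]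
        exact ih rest (by simp at hl; omega)

-- the filtered output of the input is the filtered output of what follows the leading run
theorem pvFilter_run (c : String) (rest : List String) (hc : pvIsF c = true) :
    (c :: rest).filter (fun c => !pvIsF c) = (rest.dropWhile pvIsF).filter (fun c => !pvIsF c) := by
  conv_lhs => rw [show c :: rest = (c :: rest.takeWhile pvIsF) ++ rest.dropWhile pvIsF by
    simp [List.takeWhile_append_dropWhile]]
  rw [List.filter_append, List.filter_eq_nil_iff.mpr (by
    intro d hd; simp [pvRun_all c rest hc d hd])]
  simp

-- when every run total is ≤ 0 and the accumulator is ≤ 0, A never emits: only non-F survive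
theorem pvGoA_nonpos (fuel : Nat) (l : List String) (acc : Int)
    (hl : l.length < fuel) (hacc : acc ≤ 0)
    (h : ∀ t ∈ pvRunTotalsGo fuel l, t ≤ 0) :
    pvGoA l [] acc = l.filter (fun c => !pvIsF c) := by
  induction fuel generalizing l acc with
  | zero => exact absurd hl (Nat.not_lt_zero _)
  | succ f ih =>
    match l, hl, h with
    | [], _, _ => simp [pvGoA, show ¬acc > 0 by omega]
    | c :: rest, hl, h =>
      by_cases hc : pvIsF c = true
      · have hRT : pvRunTotalsGo (f + 1) (c :: rest)
            = ((c :: rest.takeWhile pvIsF).map pvFVal).sum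
              :: pvRunTotalsGo f (rest.dropWhile pvIsF) := by
          simp [pvRunTotalsGo, hc]
        have ht : ((c :: rest.takeWhile pvIsF).map pvFVal).sum ≤ 0 :=
          h _ (by rw [hRT]; exact List.mem_cons_self ..)
        calc pvGoA (c :: rest) [] acc
            = pvGoA ((c :: rest.takeWhile pvIsF) ++ rest.dropWhile pvIsF) [] acc := by
              rw [show (c :: rest.takeWhile pvIsF) ++ rest.dropWhile pvIsF = c :: rest by
                simp [List.takeWhile_append_dropWhile]]
          _ = pvGoA (rest.dropWhile pvIsF) [] (acc + ((c :: rest.takeWhile pvIsF).map pvFVal).sum) :=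
              pvGoA_run _ _ _ (pvRun_all c rest hc)
          _ = (rest.dropWhile pvIsF).filter (fun c => !pvIsF c) := by
              refine ih _ _ ?_ (by omega) ?_
              · have := List.length_dropWhile_le pvIsF rest
                simp at hl; omega
              · intro t htm
                exact h t (by rw [hRT]; exact List.mem_cons_of_mem _ htm)
          _ = (c :: rest).filter (fun c => !pvIsF c) := (pvFilter_run c rest hc).symm
      · have hRT : pvRunTotalsGo (f + 1) (c :: rest) = pvRunTotalsGo f rest := by
          simp [pvRunTotalsGo, hc]
        have : pvGoA (c :: rest) [] acc = c :: pvGoA rest [] acc := by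
          simp only [pvGoA, hc, Bool.false_eq_true, reduceIte,
            show ¬acc > 0 by omega]
          rw [pvGoA_merged rest (([] : List String) ++ [c]) acc]; simp
        rw [this, ih rest acc (by simp at hl; omega) hacc (fun t htm => h t (by rw [hRT]; exact htm))]
        simp [hc]

-- likewise B emits nothing when every run total is ≤ 0
theorem pvAlt_nonpos (fuel : Nat) (l : List String)
    (hl : l.length < fuel)
    (h : ∀ t ∈ pvRunTotalsGo fuel l, t ≤ 0) :
    pvAltGo fuel l = l.filter (fun c => !pvIsF c) := by
  induction fuel generalizing l with
  | zero => exact absurd hl (Nat.not_lt_zero _)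
  | succ f ih =>
    match l, hl, h with
    | [], _, _ => simp [pvAltGo]
    | c :: rest, hl, h =>
      by_cases hc : pvIsF c = true
      · have hRT : pvRunTotalsGo (f + 1) (c :: rest)
            = ((c :: rest.takeWhile pvIsF).map pvFVal).sum
              :: pvRunTotalsGo f (rest.dropWhile pvIsF) := by
          simp [pvRunTotalsGo, hc]
        have ht : ((c :: rest.takeWhile pvIsF).map pvFVal).sum ≤ 0 :=
          h _ (by rw [hRT]; exact List.mem_cons_self ..)
        have htail : pvAltGo f (rest.dropWhile pvIsF)
            = (rest.dropWhile pvIsF).filter (fun c => !pvIsF c) := by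
          refine ih _ ?_ ?_
          · have := List.length_dropWhile_le pvIsF rest
            simp at hl; omega
          · intro t htm
            exact h t (by rw [hRT]; exact List.mem_cons_of_mem _ htm)
        simp only [pvAltGo, hc, if_pos, show ¬((c :: rest.takeWhile pvIsF).map pvFVal).sum > 0 by omega,
          reduceIte]
        rw [htail, pvFilter_run c rest hc]
      · have hRT : pvRunTotalsGo (f + 1) (c :: rest) = pvRunTotalsGo f rest := by
          simp [pvRunTotalsGo, hc]
        simp only [pvAltGo, hc, Bool.false_eq_true, reduceIte]
        rw [ih rest (by simp at hl; omega) (fun t htm => h t (by rw [hRT]; exact htm))]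
        simp [hc]

theorem pvMain (fuel : Nat) (l : List String) (hl : l.length < fuel)
    (h : pvHasNegBeforePos (pvRunTotalsGo fuel l) = false) :
    pvGoA l [] 0 = pvAltGo fuel l := by
  induction fuel generalizing l with
  | zero => exact absurd hl (Nat.not_lt_zero _)
  | succ f ih =>
    match l, hl, h with
    | [], _, _ => simp [pvGoA, pvAltGo]
    | c :: rest, hl, h =>
      by_cases hc : pvIsF c = true
      · have hRT : pvRunTotalsGo (f + 1) (c :: rest)
            = ((c :: rest.takeWhile pvIsF).map pvFVal).sum
              :: pvRunTotalsGo f (rest.dropWhile pvIsF) := by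
          simp [pvRunTotalsGo, hc]
        rw [hRT] at h
        simp only [pvHasNegBeforePos, Bool.or_eq_false_iff, Bool.and_eq_false_iff] at h
        obtain ⟨hhead, htail⟩ := h
        have hstep : pvGoA (c :: rest) [] 0
            = pvGoA (rest.dropWhile pvIsF) [] ((c :: rest.takeWhile pvIsF).map pvFVal).sum := by
          conv_lhs => rw [show c :: rest = (c :: rest.takeWhile pvIsF) ++ rest.dropWhile pvIsF by
            simp [List.takeWhile_append_dropWhile]]
          rw [pvGoA_run _ _ _ (pvRun_all c rest hc)]
          simp
        have hlen : (rest.dropWhile pvIsF).length < f := by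
          have := List.length_dropWhile_le pvIsF rest
          simp at hl; omega
        set t := ((c :: rest.takeWhile pvIsF).map pvFVal).sum with hT
        rcases lt_trichotomy t 0 with htl | htl | htl
        · -- negative run total: no later positive total, both sides reduce to the filter
          have hnp : ∀ u ∈ pvRunTotalsGo f (rest.dropWhile pvIsF), u ≤ 0 := by
            rcases hhead with hcon | hpos
            · simp [htl] at hcon
            · intro u hu
              by_contra hgt
              have : (pvRunTotalsGo f (rest.dropWhile pvIsF)).any (fun u => decide (0 < u)) = true :=
                List.any_eq_true.mpr ⟨u, hu, by simpa using by omega⟩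
              rw [this] at hpos; exact Bool.true_eq_false.mp hpos
          rw [hstep, pvGoA_nonpos f _ t hlen (le_of_lt htl) hnp]
          simp only [pvAltGo, hc, if_pos, show ¬t > 0 by omega, reduceIte, ← hT]
          rw [pvAlt_nonpos f _ hlen hnp]
        · -- zero run total: nothing emitted, accumulator unchanged
          rw [hstep, htl]
          have halt : pvAltGo (f + 1) (c :: rest) = pvAltGo f (rest.dropWhile pvIsF) := by
            simp only [pvAltGo, hc, if_pos, ← hT, htl, gt_iff_lt, lt_irrefl, reduceIte]
          rw [halt]
          exact ih _ hlen htail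
        · -- positive run total: flush, then recurse with a clean accumulator
          rw [hstep, pvGoA_flush _ _ htl (pvDropWhile_shape rest)]
          simp only [pvAltGo, hc, if_pos, ← hT, htl]
          rw [ih _ hlen htail]
      · have hRT : pvRunTotalsGo (f + 1) (c :: rest) = pvRunTotalsGo f rest := by
          simp [pvRunTotalsGo, hc]
        rw [hRT] at h
        have : pvGoA (c :: rest) [] 0 = c :: pvGoA rest [] 0 := by
          simp only [pvGoA, hc, Bool.false_eq_true, reduceIte, gt_iff_lt, lt_irrefl]
          rw [pvGoA_merged rest (([] : List String) ++ [c]) 0]; simp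
        rw [this, ih rest (by simp at hl; omega) h]
        simp [pvAltGo, hc]

-- ---- tightness: inside D_ the two programs always differ ----

theorem pvToDigits_ne_nil (n : Nat) : Nat.toDigits 10 n ≠ [] := by
  rw [Nat.toDigits_eq_if (by norm_num)]
  split <;> simp

theorem pvDigitChar_inj : ∀ a : Nat, a < 10 → ∀ b : Nat, b < 10 →
    Nat.digitChar a = Nat.digitChar b → a = b := by decide

theorem pvToDigits_inj (m : Nat) : ∀ n : Nat, Nat.toDigits 10 m = Nat.toDigits 10 n → m = n := by
  induction m using Nat.strong_induction_on with
  | _ m ih =>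
    intro n h
    rw [Nat.toDigits_eq_if (b := 10) (n := m) (by norm_num),
        Nat.toDigits_eq_if (b := 10) (n := n) (by norm_num)] at h
    split_ifs at h with h1 h2 h2
    · exact pvDigitChar_inj m h1 n h2 (by simpa using h)
    · exfalso
      have hlenh := congrArg List.length h
      rw [List.length_append] at hlenh
      simp only [List.length_singleton] at hlenh
      exact pvToDigits_ne_nil (n / 10) (List.eq_nil_of_length_eq_zero (by omega))
    · exfalso
      have hlenh := congrArg List.length h
      rw [List.length_append] at hlenh
      simp only [List.length_singleton] at hlenh
      exact pvToDigits_ne_nil (m / 10) (List.eq_nil_of_length_eq_zero (by omega))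
    · obtain ⟨hq, hr⟩ := List.append_inj' h (by simp)
      have hq' : m / 10 = n / 10 :=
        ih (m / 10) (Nat.div_lt_self (by omega) (by norm_num)) (n / 10) hq
      have hr' : m % 10 = n % 10 :=
        pvDigitChar_inj (m % 10) (Nat.mod_lt _ (by norm_num)) (n % 10)
          (Nat.mod_lt _ (by norm_num)) (by simpa using hr)
      omega

-- "F a" and "F b" with a, b > 0 coincide only for a = b
theorem pvFt_inj (a b : Int) (ha : 0 < a) (hb : 0 < b)
    (h : ("F " ++ PySem.Int.toStr a) = ("F " ++ PySem.Int.toStr b)) : a = b := by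
  have h' := congrArg String.toList h
  rw [String.toList_append, String.toList_append, PySem.Int.toList_toStr,
    PySem.Int.toList_toStr] at h'
  have hc : PySem.Int.toChars a = PySem.Int.toChars b := List.append_cancel_left h'
  unfold PySem.Int.toChars at hc
  rw [if_neg (by omega), if_neg (by omega)] at hc
  have := pvToDigits_inj a.toNat b.toNat hc
  omega

-- the merged "F <total>" command is itself an "F " command
theorem pvIsF_Ft (t : Int) : pvIsF ("F " ++ PySem.Int.toStr t) = true := by
  unfold pvIsF
  simp [PySem.Chars.startswith_iff]

theorem pvGoA_nil_of_nonpos (acc : Int) (hacc : acc ≤ 0) : pvGoA [] [] acc = [] := by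
  simp [pvGoA, show ¬acc > 0 by omega]

theorem pvGoA_cons_nonF (d : String) (r : List String) (acc : Int)
    (hd : pvIsF d = false) (hacc : acc ≤ 0) :
    pvGoA (d :: r) [] acc = d :: pvGoA r [] acc := by
  simp only [pvGoA, hd, Bool.false_eq_true, reduceIte, show ¬acc > 0 by omega]
  rw [pvGoA_merged r (([] : List String) ++ [d]) acc]; simp

-- with a non-positive accumulator, A's next output is never an "F " command,
-- so it cannot start like B's flushed "F <total>"
theorem pvGoA_ne_Ft_cons (rest : List String) (acc t : Int) (hacc : acc ≤ 0)
    (hshape : rest = [] ∨ ∃ d r, rest = d :: r ∧ pvIsF d = false) (tail : List String) :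
    pvGoA rest [] acc ≠ ("F " ++ PySem.Int.toStr t) :: tail := by
  rcases hshape with rfl | ⟨d, r, rfl, hd⟩
  · rw [pvGoA_nil_of_nonpos acc hacc]; simp
  · rw [pvGoA_cons_nonF d r acc hd hacc]
    intro h
    have hh : d = "F " ++ PySem.Int.toStr t := (List.cons.injEq _ _ _ _ ▸ h).1
    rw [hh, pvIsF_Ft t] at hd
    exact Bool.true_eq_false.mp hd

theorem pvTight (fuel : Nat) (l : List String) (acc : Int) (hl : l.length < fuel)
    (hacc : acc ≤ 0)
    (h : (acc < 0 ∧ (pvRunTotalsGo fuel l).any (fun u => decide (0 < u)) = true)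
       ∨ (acc = 0 ∧ pvHasNegBeforePos (pvRunTotalsGo fuel l) = true)) :
    pvGoA l [] acc ≠ pvAltGo fuel l := by
  induction fuel generalizing l acc with
  | zero => exact absurd hl (Nat.not_lt_zero _)
  | succ f ih =>
    match l, hl, h with
    | [], _, h =>
      rcases h with ⟨_, hp⟩ | ⟨_, hp⟩ <;> simp [pvRunTotalsGo, pvHasNegBeforePos] at hp
    | c :: rest, hl, h =>
      have hlen : (rest.dropWhile pvIsF).length < f := by
        have := List.length_dropWhile_le pvIsF rest
        simp at hl; omega
      by_cases hc : pvIsF c = true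
      · have hgo : pvRunTotalsGo (f + 1) (c :: rest)
            = ((c :: rest.takeWhile pvIsF).map pvFVal).sum
              :: pvRunTotalsGo f (rest.dropWhile pvIsF) := by
          simp [pvRunTotalsGo, hc]
        have hstep : pvGoA (c :: rest) [] acc
            = pvGoA (rest.dropWhile pvIsF) [] (acc + ((c :: rest.takeWhile pvIsF).map pvFVal).sum) := by
          conv_lhs => rw [show c :: rest = (c :: rest.takeWhile pvIsF) ++ rest.dropWhile pvIsF by
            simp [List.takeWhile_append_dropWhile]]
          rw [pvGoA_run _ _ _ (pvRun_all c rest hc)]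
        set t := ((c :: rest.takeWhile pvIsF).map pvFVal).sum with hT
        rw [hstep]
        rcases h with ⟨haccneg, hp⟩ | ⟨rfl, hp⟩
        · -- accumulator already negative: a later positive total exists
          rw [hgo] at hp
          rcases lt_trichotomy (acc + t) 0 with hacc' | hacc' | hacc'
          · by_cases htpos : 0 < t
            · -- B flushes this run, A does not flush now
              simp only [pvAltGo, hc, if_pos, ← hT, htpos]
              exact pvGoA_ne_Ft_cons _ _ _ (le_of_lt hacc') (pvDropWhile_shape rest) _
            · have hp' : (pvRunTotalsGo f (rest.dropWhile pvIsF)).any (fun u => decide (0 < u)) = true := by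
                simp only [List.any_cons, Bool.or_eq_true] at hp
                rcases hp with hp | hp
                · exact absurd (by simpa using hp) htpos
                · exact hp
              simp only [pvAltGo, hc, if_pos, ← hT, show ¬t > 0 by omega, reduceIte]
              exact ih _ _ hlen (le_of_lt hacc') (Or.inl ⟨hacc', hp'⟩)
          · -- the run exactly cancels the debt: B flushes, A has nothing to flush
            have htpos : 0 < t := by omega
            simp only [pvAltGo, hc, if_pos, ← hT, htpos]
            rw [hacc']
            exact pvGoA_ne_Ft_cons _ _ _ (le_refl 0) (pvDropWhile_shape rest) _
          · -- both flush, but A's total was eaten into by the debt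
            have htpos : 0 < t := by omega
            simp only [pvAltGo, hc, if_pos, ← hT, htpos]
            rw [pvGoA_flush _ _ hacc' (pvDropWhile_shape rest)]
            intro hEq
            have hhead := (List.cons.injEq _ _ _ _ ▸ hEq).1
            have := pvFt_inj _ _ hacc' htpos hhead
            omega
        · -- clean accumulator: a negative total precedes a positive one
          rw [hgo] at hp
          simp only [zero_add]
          rcases lt_trichotomy t 0 with htl | htl | htl
          · have hp' : (pvRunTotalsGo f (rest.dropWhile pvIsF)).any (fun u => decide (0 < u)) = true := by
              simp only [pvHasNegBeforePos, Bool.or_eq_true, Bool.and_eq_true] at hp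
              rcases hp with ⟨_, hp⟩ | hp
              · exact hp
              · exact pvHasPos_of_HNBP _ hp
            simp only [pvAltGo, hc, if_pos, ← hT, show ¬t > 0 by omega, reduceIte]
            exact ih _ _ hlen (le_of_lt htl) (Or.inl ⟨htl, hp'⟩)
          · have hp' : pvHasNegBeforePos (pvRunTotalsGo f (rest.dropWhile pvIsF)) = true := by
              simpa [pvHasNegBeforePos, htl] using hp
            simp only [pvAltGo, hc, if_pos, ← hT, htl, gt_iff_lt, lt_irrefl, reduceIte]
            rw [← htl]
            exact ih _ _ hlen (le_of_eq htl) (Or.inr ⟨htl, hp'⟩)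
          · have hp' : pvHasNegBeforePos (pvRunTotalsGo f (rest.dropWhile pvIsF)) = true := by
              simpa [pvHasNegBeforePos, show ¬t < 0 by omega] using hp
            rw [pvGoA_flush _ _ htl (pvDropWhile_shape rest)]
            simp only [pvAltGo, hc, if_pos, ← hT, htl]
            intro hEq
            exact ih _ _ hlen (le_refl 0) (Or.inr ⟨rfl, hp'⟩) (List.cons.injEq _ _ _ _ ▸ hEq).2
      · -- non-F head: both emit it and continue
        have hcf : pvIsF c = false := by simpa using hc
        have hgo : pvRunTotalsGo (f + 1) (c :: rest) = pvRunTotalsGo f rest := by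
          simp [pvRunTotalsGo, hc]
        rw [pvGoA_cons_nonF c rest acc hcf hacc]
        simp only [pvAltGo, hcf, Bool.false_eq_true, reduceIte]
        intro hEq
        rw [hgo] at h
        exact ih rest acc (by simp at hl; omega) hacc h (List.cons.injEq _ _ _ _ ▸ hEq).2

-- ===== VERDICT =====
theorem merge_forward_commands_spec : Claim_unchanged_merge_forward_commands := by
  intro commands _ _ hD
  have h0 : (((pvSplitTotals commands).dropWhile (fun t => decide (0 ≤ t))).tail.any
      (fun t => decide (0 < t))) = false :=
    Bool.eq_false_iff.mpr (fun he => hD he)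
  rw [pvNegB_eq, ← pvHNBP_filter,
    pvFilterSplit_eq (commands.length + 1) commands (Nat.lt_succ_self _),
    pvHNBP_filter] at h0
  exact pvMain (commands.length + 1) commands (Nat.lt_succ_self _) h0

theorem merge_forward_commands_changed : Claim_changed_merge_forward_commands := by
  unfold Claim_changed_merge_forward_commands; decide

theorem merge_forward_commands_tight : Claim_exact_merge_forward_commands := by
  intro commands _ _ hD
  have h0 : (((pvSplitTotals commands).dropWhile (fun t => decide (0 ≤ t))).tail.any
      (fun t => decide (0 < t))) = true := hD
  rw [pvNegB_eq, ← pvHNBP_filter,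
    pvFilterSplit_eq (commands.length + 1) commands (Nat.lt_succ_self _),
    pvHNBP_filter] at h0
  exact pvTight (commands.length + 1) commands 0 (Nat.lt_succ_self _) (le_refl 0)
    (Or.inr ⟨rfl, h0⟩)
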